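-- pv_equiv track=rewrite | github.com/hhosu107/slash-bot | main.py | make_pretty_rolls
-- ===== SOURCE A (Python) =====
-- def make_pretty_rolls(not_so_pretty):
--     delimiter = ' '
--     size = 8
--     pretty_rolls = ''
--     if len(not_so_pretty) > size:
--         batch_rolls = make_batch(not_so_pretty, size)
--         for batch in batch_rolls:
--             pretty_rolls += delimiter.join(str(r) for r in batch)
--             pretty_rolls += '\n'
--     else:
--         pretty_rolls = delimiter.join(str(x) for x in not_so_pretty)
--     return pretty_rolls
--
-- def make_batch(origin_list, size):
--     new_list = []
--     for i in range(0, len(origin_list), size):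
--         new_list.append(origin_list[i:i + size])
--     return new_list
-- ===== SOURCE B (Python) =====
-- def make_pretty_rolls(not_so_pretty):
--     n = len(not_so_pretty)
--     if n <= 8:
--         return ' '.join(str(x) for x in not_so_pretty)
--     out = ''
--     for i, x in enumerate(not_so_pretty):
--         out += str(x)
--         out += '\n' if i % 8 == 7 or i == n - 1 else ' '
--     return out
-- ===== Notes on version B (the rewrite author's own statement) =====
-- stated objective: simpler
-- what changed: Drops make_batch and the list-of-batches entirely: one flat enumerate pass emits each number followed by a newline at every 8th position or at the end, instead of materializing sublists and joining each batch.
import Mathlib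
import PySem

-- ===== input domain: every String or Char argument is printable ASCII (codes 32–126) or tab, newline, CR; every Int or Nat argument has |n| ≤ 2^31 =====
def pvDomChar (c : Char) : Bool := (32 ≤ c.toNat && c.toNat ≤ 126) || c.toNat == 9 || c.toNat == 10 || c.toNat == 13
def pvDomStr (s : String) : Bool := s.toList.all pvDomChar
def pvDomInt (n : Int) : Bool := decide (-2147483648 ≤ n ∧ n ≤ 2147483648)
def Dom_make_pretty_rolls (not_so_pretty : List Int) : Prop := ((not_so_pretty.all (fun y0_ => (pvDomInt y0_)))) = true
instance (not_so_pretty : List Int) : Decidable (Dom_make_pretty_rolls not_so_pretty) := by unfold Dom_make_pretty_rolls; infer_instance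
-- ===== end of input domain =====

-- B replaces A's make_batch + per-batch joins by one flat enumerate pass that appends a newline
-- at every 8th position or at the end (objective: simpler; return values proved equal on all inputs).

-- ===== PORT A =====
def make_batch (origin_list : List Int) (size : Int) : List (List Int) :=
  (PySem.List.pyRange 0 (origin_list.length : Int) size).foldl
    (fun new_list i => new_list ++ [PySem.List.slice origin_list (some i) (some (i + size))]) []

def make_pretty_rolls (not_so_pretty : List Int) : String :=
  if (not_so_pretty.length : Int) > 8 then
    (make_batch not_so_pretty 8).foldl
      (fun pretty_rolls batch =>
        pretty_rolls ++ PySem.Str.join " " (batch.map PySem.Int.toStr) ++ "\n") ""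
  else
    PySem.Str.join " " (not_so_pretty.map PySem.Int.toStr)

-- ===== PORT B =====
def make_pretty_rolls_alt (not_so_pretty : List Int) : String :=
  if (not_so_pretty.length : Int) ≤ 8 then
    PySem.Str.join " " (not_so_pretty.map PySem.Int.toStr)
  else
    (PySem.List.enumerate not_so_pretty 0).foldl
      (fun out p =>
        out ++ PySem.Int.toStr p.2 ++
          (if PySem.Int.mod p.1 8 = 7 ∨ p.1 = (not_so_pretty.length : Int) - 1 then "\n" else " "))
      ""

-- ===== PRECONDITION & SPEC =====
def Spec_make_pretty_rolls (not_so_pretty : List Int) (out : String) : Prop := out = make_pretty_rolls_alt not_so_pretty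
instance (not_so_pretty : List Int) (out : String) : Decidable (Spec_make_pretty_rolls not_so_pretty out) := by unfold Spec_make_pretty_rolls; infer_instance

-- ===== CLAIM (what is proved, stated in full; the proofs are below) =====
def Claim_equal_make_pretty_rolls : Prop := ∀ (not_so_pretty : List Int), Dom_make_pretty_rolls not_so_pretty → Spec_make_pretty_rolls not_so_pretty (make_pretty_rolls not_so_pretty)

-- ===== LEMMAS AND PROOFS =====

-- A's batches, as structural recursion: take 8, recurse on the rest (proof helper only).
def chunkList (ys : List Int) : List (List Int) :=
  if h : ys = [] then [] else ys.take 8 :: chunkList (ys.drop 8)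
termination_by ys.length
decreasing_by
  simp only [List.length_drop]
  have : 0 < ys.length := List.length_pos_iff.mpr h
  omega

-- the common output, at the character level: each chunk space-joined and newline-terminated.
def renderChunks (ys : List Int) : List Char :=
  if h : ys = [] then [] else
    PySem.Chars.join [' '] ((ys.take 8).map PySem.Int.toChars) ++ '\n' :: renderChunks (ys.drop 8)
termination_by ys.length
decreasing_by
  simp only [List.length_drop]
  have : 0 < ys.length := List.length_pos_iff.mpr h
  omega

theorem pyRange8_nil (a b : Int) (h : b ≤ a) : PySem.List.pyRange a b 8 = [] := by
  rw [PySem.List.pyRange_of_pos _ _ (by norm_num : (0:Int) < 8), if_neg (not_lt.mpr h)]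
  simp

theorem pyRange8_cons (a b : Int) (h : a < b) :
    PySem.List.pyRange a b 8 = a :: PySem.List.pyRange (a + 8) b 8 := by
  rw [PySem.List.pyRange_of_pos _ _ (by norm_num : (0:Int) < 8),
      PySem.List.pyRange_of_pos _ _ (by norm_num : (0:Int) < 8), if_pos h]
  by_cases h2 : a + 8 < b
  · rw [if_pos h2]
    have hN : ((b - a + 8 - 1) / 8).toNat = ((b - (a + 8) + 8 - 1) / 8).toNat + 1 := by omega
    rw [hN, List.range_succ_eq_map, List.map_cons, List.map_map]
    congr 1
    · simp
    · refine List.map_congr_left fun k _ => ?_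
      show a + 8 * ((k + 1 : Nat) : Int) = a + 8 + 8 * (k : Int)
      push_cast
      ring
  · rw [if_neg h2]
    have hN : ((b - a + 8 - 1) / 8).toNat = 1 := by omega
    rw [hN]
    simp

-- A's index loop over range(0, len, 8) with slices builds exactly the structural chunks.
theorem mb : ∀ (n : Nat) (ys pre : List Int) (acc : List (List Int)), ys.length = n →
    (PySem.List.pyRange (pre.length : Int) ((pre.length : Int) + (ys.length : Int)) 8).foldl
      (fun nl i => nl ++ [PySem.List.slice (pre ++ ys) (some i) (some (i + 8))]) acc
    = acc ++ chunkList ys := by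
  intro n
  induction n using Nat.strong_induction_on with
  | _ n ih =>
    intro ys pre acc hlen
    by_cases hnil : ys = []
    · subst hnil
      rw [pyRange8_nil _ _ (by simp)]
      rw [chunkList]
      simp
    · have hpos : 0 < ys.length := List.length_pos_iff.mpr hnil
      rw [pyRange8_cons _ _ (by omega), List.foldl_cons]
      have hsl : PySem.List.slice (pre ++ ys) (some (pre.length : Int)) (some ((pre.length : Int) + 8))
          = ys.take 8 := by
        rw [show ((8:Int)) = ((8:Nat):Int) by norm_num, PySem.List.slice_natCast_add, List.drop_left]
      rw [hsl, chunkList, dif_neg hnil]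
      by_cases hle : ys.length ≤ 8
      · have hd : ys.drop 8 = [] := List.drop_eq_nil_of_le hle
        rw [show (pre.length : Int) + 8 = ((pre.length : Int) + 8) by ring]
        rw [pyRange8_nil _ _ (by omega)]
        rw [List.foldl_nil, hd, chunkList]
        simp
      · replace hle : 8 < ys.length := by omega
        have key := ih (ys.drop 8).length (by rw [List.length_drop]; omega)
          (ys.drop 8) (pre ++ ys.take 8) (acc ++ [ys.take 8]) rfl
        have e1 : (pre ++ ys.take 8).length = pre.length + 8 := by
          simp [List.length_take]
          omega
        rw [e1, List.append_assoc, List.take_append_drop] at key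
        have e2 : ((pre.length + 8 : Nat) : Int) = (pre.length : Int) + 8 := by push_cast; ring
        rw [e2] at key
        have e3 : ((ys.drop 8).length : Int) = (ys.length : Int) - 8 := by
          rw [List.length_drop]; omega
        rw [e3] at key
        have e4 : (pre.length : Int) + 8 + ((ys.length : Int) - 8)
            = (pre.length : Int) + (ys.length : Int) := by ring
        rw [e4] at key
        rw [key]
        simp

-- A's join-and-newline fold over the chunks renders renderChunks.
theorem foldA : ∀ (n : Nat) (ys : List Int), ys.length = n → ∀ (acc : String),
    ((chunkList ys).foldl
      (fun p batch => p ++ PySem.Str.join " " (batch.map PySem.Int.toStr) ++ "\n") acc).toList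
    = acc.toList ++ renderChunks ys := by
  intro n
  induction n using Nat.strong_induction_on with
  | _ n ih =>
    intro ys hlen acc
    by_cases hnil : ys = []
    · subst hnil
      rw [chunkList, renderChunks]
      simp
    · have hpos : 0 < ys.length := List.length_pos_iff.mpr hnil
      rw [chunkList, dif_neg hnil, renderChunks, dif_neg hnil, List.foldl_cons]
      have key := ih (ys.drop 8).length (by rw [List.length_drop]; omega) (ys.drop 8) rfl
        (acc ++ PySem.Str.join " " ((ys.take 8).map PySem.Int.toStr) ++ "\n")
      rw [key]
      have hfun : (String.toList ∘ PySem.Int.toStr) = PySem.Int.toChars :=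
        funext PySem.Int.toList_toStr
      simp [String.toList_append, PySem.Str.toList_join, List.map_map, hfun,
        show (" ":String).toList = [' '] from rfl,
        show ("\n":String).toList = ['\n'] from rfl]

-- One contiguous segment of B's flat loop, when the separator condition fires exactly at the
-- segment's last index: it emits the space-joined words followed by one newline.
theorem segGen (e : Int) : ∀ (ys : List Int) (s : Int) (acc : String), ys ≠ [] →
    (∀ j : Nat, j < ys.length →
      ((PySem.Int.mod (s + (j : Int)) 8 = 7 ∨ s + (j : Int) = e) ↔ j + 1 = ys.length)) →
    ((PySem.List.enumerate ys s).foldl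
        (fun out p => out ++ PySem.Int.toStr p.2 ++
          (if PySem.Int.mod p.1 8 = 7 ∨ p.1 = e then "\n" else " ")) acc).toList
    = acc.toList ++ PySem.Chars.join [' '] (ys.map PySem.Int.toChars) ++ ['\n'] := by
  intro ys
  induction ys with
  | nil => intro s acc h; exact absurd rfl h
  | cons x t ihv =>
    intro s acc _ hcond
    rw [PySem.List.enumerate_cons, List.foldl_cons]
    have h0 := hcond 0 (by simp)
    simp only [Nat.cast_zero, add_zero, List.length_cons] at h0
    by_cases ht : t = []
    · subst ht
      rw [PySem.List.enumerate_nil, List.foldl_nil]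
      rw [if_pos (h0.mpr (by simp))]
      simp [String.toList_append, PySem.Int.toList_toStr, PySem.Chars.join_singleton,
          show ("\n":String).toList = ['\n'] from rfl]
    · have htpos : 0 < t.length := List.length_pos_iff.mpr ht
      rw [if_neg (by rw [h0]; omega)]
      obtain ⟨y, t', rfl⟩ := List.exists_cons_of_ne_nil ht
      have key := ihv (s + 1) (acc ++ PySem.Int.toStr x ++ " ") (by simp) ?_
      · rw [key]
        simp [String.toList_append, PySem.Int.toList_toStr, PySem.Chars.join_cons_cons,
          show (" ":String).toList = [' '] from rfl]
      · intro j hj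
        have h := hcond (j + 1) (by simp only [List.length_cons] at hj ⊢; omega)
        have ecast : s + ((j + 1 : Nat) : Int) = s + 1 + (j : Int) := by push_cast; ring
        rw [ecast] at h
        simp only [List.length_cons] at h ⊢
        exact h.trans (by omega)

-- B's whole flat loop over a tail starting at global index 8*k renders renderChunks of that tail.
theorem renderB : ∀ (n : Nat) (ys : List Int) (k : Nat), ys.length = n → ys ≠ [] → ∀ (acc : String),
    ((PySem.List.enumerate ys (8 * (k : Int))).foldl
      (fun out p => out ++ PySem.Int.toStr p.2 ++
        (if PySem.Int.mod p.1 8 = 7 ∨ p.1 = 8 * (k : Int) + (ys.length : Int) - 1 then "\n" else " "))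
      acc).toList
    = acc.toList ++ renderChunks ys := by
  intro n
  induction n using Nat.strong_induction_on with
  | _ n ih =>
    intro ys k hlen hnil acc
    have hpos : 0 < ys.length := List.length_pos_iff.mpr hnil
    rw [renderChunks, dif_neg hnil]
    by_cases hle : ys.length ≤ 8
    · have hd : ys.drop 8 = [] := List.drop_eq_nil_of_le hle
      have htake : ys.take 8 = ys := List.take_of_length_le hle
      have key := segGen (8 * (k : Int) + (ys.length : Int) - 1) ys (8 * (k : Int)) acc hnil ?_
      · rw [key, hd, renderChunks, htake]
        simp
      · intro j hj
        rw [PySem.Int.mod_eq_emod_of_pos (by norm_num : (0:Int) < 8)]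
        omega
    · replace hle : 8 < ys.length := by omega
      have hsplit : ys.take 8 ++ ys.drop 8 = ys := List.take_append_drop 8 ys
      rw [show PySem.List.enumerate ys (8 * (k : Int))
            = PySem.List.enumerate (ys.take 8 ++ ys.drop 8) (8 * (k : Int)) from by rw [hsplit]]
      rw [PySem.List.enumerate_append, List.foldl_append]
      have htlen : (ys.take 8).length = 8 := by
        rw [List.length_take]; omega
      have key1 := segGen (8 * (k : Int) + (ys.length : Int) - 1) (ys.take 8) (8 * (k : Int)) acc
        (by intro h; rw [h] at htlen; simp at htlen) ?_
      · have key2 := ih (ys.drop 8).length (by rw [List.length_drop]; omega) (ys.drop 8) (k + 1)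
          rfl (by intro h; rw [h] at hsplit; simp at hsplit; omega)
          ((PySem.List.enumerate (ys.take 8) (8 * (k : Int))).foldl
            (fun out p => out ++ PySem.Int.toStr p.2 ++
              (if PySem.Int.mod p.1 8 = 7 ∨ p.1 = 8 * (k : Int) + (ys.length : Int) - 1 then "\n" else " "))
            acc)
        have e3 : 8 * ((k + 1 : Nat) : Int) + ((ys.drop 8).length : Int) - 1
            = 8 * (k : Int) + (ys.length : Int) - 1 := by
          rw [List.length_drop]; omega
        have e5 : (8 : Int) * ((k + 1 : Nat) : Int) = 8 * (k : Int) + ((ys.take 8).length : Int) := by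
          rw [htlen]; push_cast; ring
        rw [e3, e5] at key2
        rw [key2, key1]
        simp
      · intro j hj
        rw [htlen] at hj
        rw [PySem.Int.mod_eq_emod_of_pos (by norm_num : (0:Int) < 8), htlen]
        omega

-- ===== VERDICT (by name: the statement is the Claim_ definition above) =====
theorem make_pretty_rolls_spec : Claim_equal_make_pretty_rolls := by
  intro xs _
  unfold Spec_make_pretty_rolls make_pretty_rolls make_pretty_rolls_alt
  by_cases h : (xs.length : Int) > 8
  · rw [if_pos h, if_neg (not_le.mpr h)]
    apply String.toList_inj.mp
    have hnil : xs ≠ [] := by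
      intro hx; rw [hx] at h; simp at h
    have hmb : make_batch xs 8 = chunkList xs := by
      unfold make_batch
      have := mb xs.length xs [] [] rfl
      simpa using this
    rw [hmb, foldA xs.length xs rfl ""]
    have hb := renderB xs.length xs 0 rfl hnil ""
    simp only [Nat.cast_zero, mul_zero, zero_add] at hb
    rw [hb]
  · rw [if_neg h, if_pos (not_lt.mp h)]
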